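-- pv_equiv track=rewrite | github.com/sla2yer/fruity_quantum_flyway_brain_simulator | src/flywire_wave/validation_circuit.py | _group_findings_by_validator
-- ===== SOURCE A (Python) =====
-- import copy
-- from collections.abc import Mapping, Sequence
-- from typing import Any
--
-- def _group_findings_by_validator(
--     findings: Sequence[Mapping[str, Any]],
-- ) -> dict[str, list[dict[str, Any]]]:
--     grouped: dict[str, list[dict[str, Any]]] = {}
--     for item in findings:
--         grouped.setdefault(str(item["validator_id"]), []).append(copy.deepcopy(dict(item)))
--     return {
--         validator_id: sorted(
--             validator_findings,
--             key=lambda finding: str(finding["finding_id"]),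
--         )
--         for validator_id, validator_findings in sorted(grouped.items())
--     }
-- ===== SOURCE B (Python) =====
-- import copy
--
--
-- def _group_findings_by_validator(findings):
--     ordered = sorted(
--         findings,
--         key=lambda item: (str(item["validator_id"]), str(item["finding_id"])),
--     )
--     result = {}
--     i = 0
--     n = len(ordered)
--     while i < n:
--         key = str(ordered[i]["validator_id"])
--         group = []
--         j = i
--         while j < n and str(ordered[j]["validator_id"]) == key:
--             group.append(copy.deepcopy(dict(ordered[j])))
--             j += 1
--         result[key] = group
--         i = j
--     return result
-- ===== Notes on version B (the rewrite author's own statement) =====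
-- stated objective: alternative
-- what changed: B sorts the findings once by the pair (validator_id, finding_id) and then splits the sorted sequence into contiguous runs of equal validator_id with a two-index scan, emitting each run as a group, instead of A's dict-grouping pass followed by a per-group sort and an outer sort of the dict items.
import Mathlib
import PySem

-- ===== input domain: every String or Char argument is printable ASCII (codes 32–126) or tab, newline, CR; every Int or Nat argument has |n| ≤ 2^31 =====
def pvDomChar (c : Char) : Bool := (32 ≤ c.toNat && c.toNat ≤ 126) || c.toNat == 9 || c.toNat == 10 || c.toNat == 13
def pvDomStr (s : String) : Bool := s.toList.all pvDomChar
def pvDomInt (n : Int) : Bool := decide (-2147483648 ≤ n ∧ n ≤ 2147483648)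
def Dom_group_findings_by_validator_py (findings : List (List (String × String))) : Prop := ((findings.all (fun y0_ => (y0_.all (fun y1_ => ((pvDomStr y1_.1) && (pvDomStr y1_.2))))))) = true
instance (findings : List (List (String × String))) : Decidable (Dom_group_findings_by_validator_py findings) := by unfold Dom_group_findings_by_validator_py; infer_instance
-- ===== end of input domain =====

-- B sorts the findings once by (validator_id, finding_id) and splits the sorted list into
-- contiguous runs of equal validator_id (no dict, no per-group sort), instead of A's
-- group-into-a-dict pass followed by a per-group sort and an outer sort of the items;
-- objective: alternative decomposition (return-value equivalence).


-- ===== PORT A =====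
-- str(item["validator_id"]) / str(item["finding_id"]): values are already str; Pre_ guarantees the
-- key is present, so the getD default is never used on admitted inputs.
def pvVid (item : List (String × String)) : String := (PySem.Dict.mk item).getD "validator_id" ""
def pvFid (item : List (String × String)) : String := (PySem.Dict.mk item).getD "finding_id" ""

-- A's grouping loop: grouped.setdefault(str(item["validator_id"]), []).append(copy.deepcopy(dict(item)))
-- (dict(item)/deepcopy are the identity on an association list with distinct keys, which Pre_ guarantees)
def pvGroup (l : List (List (String × String))) : PySem.Dict String (List (List (String × String))) :=
  l.foldl (fun d item => d.modify (pvVid item) [] (fun g => g ++ [item])) PySem.Dict.empty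

def group_findings_by_validator_py (findings : List (List (String × String))) : List (String × List (List (String × String))) :=
  let grouped := pvGroup findings
  -- sorted(grouped.items()): dict keys are distinct, so Python's tuple comparison never reaches the
  -- second component — sorting by the key alone is exact here.
  (PySem.List.sorted grouped.items (fun p => p.1)).map
    (fun p => (p.1, PySem.List.sorted p.2 pvFid))

-- ===== PORT B =====
-- B's own key accessors (same str(item[...]) reads as in Source B)
def pvKeyB (item : List (String × String)) : String := (PySem.Dict.mk item).getD "validator_id" ""
def pvFidB (item : List (String × String)) : String := (PySem.Dict.mk item).getD "finding_id" ""

-- Source B's two-index while loop over the sorted list: each outer step takes the maximal run of items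
-- whose validator_id equals the run head's, emits (key, run), and continues after the run.
def pvRuns : List (List (String × String)) → List (String × List (List (String × String)))
  | [] => []
  | x :: xs =>
    (pvKeyB x, (x :: xs).takeWhile (fun y => pvKeyB y == pvKeyB x)) ::
      pvRuns ((x :: xs).dropWhile (fun y => pvKeyB y == pvKeyB x))
termination_by l => l.length
decreasing_by
  simp only [List.dropWhile_cons, beq_self_eq_true, if_true]
  exact Nat.lt_succ_of_le (List.length_dropWhile_le _ _)

def group_findings_by_validator_py_alt (findings : List (List (String × String))) : List (String × List (List (String × String))) :=
  pvRuns (PySem.List.sorted2 findings pvKeyB pvFidB)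

-- ===== PRECONDITION & SPEC =====
-- Pre_ excludes (i) items missing the "validator_id" or "finding_id" key, on which the Python raises
-- KeyError, and (ii) items with duplicate keys, which a Python Mapping cannot even represent (it
-- collapses them before A is called), so the association-list corner has no Python behaviour to match.
def Pre_group_findings_by_validator_py (findings : List (List (String × String))) : Prop :=
  ∀ item ∈ findings, (item.map Prod.fst).Nodup ∧
    (PySem.Dict.mk item).contains "validator_id" = true ∧
    (PySem.Dict.mk item).contains "finding_id" = true
instance (findings : List (List (String × String))) : Decidable (Pre_group_findings_by_validator_py findings) := by unfold Pre_group_findings_by_validator_py; infer_instance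

def pvWitness_group_findings_by_validator_py : (List (List (String × String))) :=
  [[("validator_id", "v1"), ("finding_id", "f2")], [("validator_id", "v0"), ("finding_id", "f1")]]

def Spec_group_findings_by_validator_py (findings : List (List (String × String))) (out : List (String × List (List (String × String)))) : Prop := out = group_findings_by_validator_py_alt findings
instance (findings : List (List (String × String))) (out : List (String × List (List (String × String)))) : Decidable (Spec_group_findings_by_validator_py findings out) := by unfold Spec_group_findings_by_validator_py; infer_instance

-- ===== CLAIM (what is proved, stated in full; the proofs are below) =====
def Claim_equal_group_findings_by_validator_py : Prop := ∀ (findings : List (List (String × String))), Dom_group_findings_by_validator_py findings → Pre_group_findings_by_validator_py findings → Spec_group_findings_by_validator_py findings (group_findings_by_validator_py findings)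

-- ===== LEMMAS AND PROOFS =====

lemma pvKeyB_eq : pvKeyB = pvVid := rfl
lemma pvFidB_eq : pvFidB = pvFid := rfl

-- the lexicographic two-key comparison sorted2 uses
def pvLt (a b : List (String × String)) : Bool :=
  decide (pvVid a < pvVid b) || (!decide (pvVid b < pvVid a) && decide (pvFid a < pvFid b))

lemma pvLt_iff (a b : List (String × String)) :
    pvLt a b = true ↔ (pvVid a < pvVid b ∨ (pvVid a = pvVid b ∧ pvFid a < pvFid b)) := by
  simp only [pvLt, Bool.or_eq_true, Bool.and_eq_true, Bool.not_eq_true', decide_eq_true_eq,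
    decide_eq_false_iff_not]
  constructor
  · rintro (h | ⟨h1, h2⟩)
    · exact Or.inl h
    · rcases lt_trichotomy (pvVid a) (pvVid b) with h' | h' | h'
      · exact Or.inl h'
      · exact Or.inr ⟨h', h2⟩
      · exact absurd h' h1
  · rintro (h | ⟨h1, h2⟩)
    · exact Or.inl h
    · exact Or.inr ⟨by rw [h1]; exact lt_irrefl _, h2⟩

lemma pvLt_false_iff (a b : List (String × String)) :
    pvLt a b = false ↔ ¬ (pvVid a < pvVid b ∨ (pvVid a = pvVid b ∧ pvFid a < pvFid b)) := by
  rw [← pvLt_iff]; exact Bool.not_eq_true _ ▸ Bool.eq_false_iff.trans (by simp)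

-- insertBy computation rules (definitional)
lemma insertBy_nil (bf : List (String × String) → List (String × String) → Bool) (x : List (String × String)) :
    PySem.List.insertBy bf x [] = [x] := rfl

lemma insertBy_cons (bf : List (String × String) → List (String × String) → Bool)
    (x y : List (String × String)) (ys : List (List (String × String))) :
    PySem.List.insertBy bf x (y :: ys) =
      if bf x y then x :: y :: ys else y :: PySem.List.insertBy bf x ys := rfl

lemma pvLt_trans {a b c : List (String × String)} (h1 : pvLt a b = true) (h2 : pvLt b c = true) :
    pvLt a c = true := by
  rw [pvLt_iff] at *
  rcases h1 with h1 | ⟨h1, h1'⟩ <;> rcases h2 with h2 | ⟨h2, h2'⟩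
  · exact Or.inl (lt_trans h1 h2)
  · exact Or.inl (h2 ▸ h1)
  · exact Or.inl (h1 ▸ h2)
  · exact Or.inr ⟨h1.trans h2, lt_trans h1' h2'⟩

lemma pvLt_asymm {a b : List (String × String)} (h : pvLt a b = true) : pvLt b a = false := by
  rw [pvLt_iff] at h
  rw [pvLt_false_iff]
  rintro (h' | ⟨h', h''⟩) <;> rcases h with h | ⟨h1, h2⟩
  · exact absurd h (not_lt_of_gt h')
  · exact absurd (h1 ▸ h') (lt_irrefl _)
  · exact absurd (h' ▸ h) (lt_irrefl _)
  · exact absurd h2 (not_lt_of_gt h'')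

-- the accumulator of the insertion sort stays pairwise "not greater"
lemma pairwise_insertBy (x : List (String × String)) (acc : List (List (String × String)))
    (h : acc.Pairwise (fun a b => pvLt b a = false)) :
    (PySem.List.insertBy pvLt x acc).Pairwise (fun a b => pvLt b a = false) := by
  induction acc with
  | nil => simp [insertBy_nil]
  | cons y ys ih =>
    rw [insertBy_cons]
    rcases List.pairwise_cons.mp h with ⟨hy, hys⟩
    by_cases hlt : pvLt x y = true
    · simp only [hlt, if_true]
      refine List.pairwise_cons.mpr ⟨?_, h⟩
      intro z hz
      rcases List.mem_cons.mp hz with rfl | hz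
      · exact pvLt_asymm hlt
      · by_cases hzx : pvLt z x = true
        · have := pvLt_trans hzx hlt
          rw [hy z hz] at this
          exact absurd this (by simp)
        · exact Bool.eq_false_iff.mpr hzx
    · have hlt' : pvLt x y = false := Bool.eq_false_iff.mpr hlt
      simp only [hlt', Bool.false_eq_true, if_false]
      refine List.pairwise_cons.mpr ⟨?_, ih hys⟩
      intro z hz
      rcases (PySem.List.mem_insertBy _ _ _ _).mp hz with rfl | hz
      · exact hlt'
      · exact hy z hz

lemma pairwise_foldl_insertBy (xs : List (List (String × String))) :
    ∀ acc, acc.Pairwise (fun a b => pvLt b a = false) →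
      (xs.foldl (fun a x => PySem.List.insertBy pvLt x a) acc).Pairwise (fun a b => pvLt b a = false) := by
  induction xs with
  | nil => intro acc h; exact h
  | cons x xs ih => intro acc h; exact ih _ (pairwise_insertBy x acc h)

-- the comparison the per-run order uses
def pvLtF (a b : List (String × String)) : Bool := decide (pvFid a < pvFid b)

-- filtering past an inserted element that the filter drops
lemma filter_insertBy_neg (p : List (String × String) → Bool)
    (bf : List (String × String) → List (String × String) → Bool)
    (x : List (String × String)) (acc : List (List (String × String))) (hx : p x = false) :
    (PySem.List.insertBy bf x acc).filter p = acc.filter p := by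
  induction acc with
  | nil => simp [insertBy_nil, List.filter, hx]
  | cons y ys ih =>
    rw [insertBy_cons]
    by_cases hlt : bf x y = true
    · simp [hlt, List.filter, hx]
    · simp only [hlt, if_false, Bool.false_eq_true]
      simp [List.filter_cons, ih]

-- the crux: filtering one validator out of a lex-insert is a finding_id-insert into the filtered list
lemma filter_insertBy_pos (k : String) (x : List (String × String))
    (acc : List (List (String × String)))
    (hx : pvVid x = k) (h : acc.Pairwise (fun a b => pvLt b a = false)) :
    (PySem.List.insertBy pvLt x acc).filter (fun a => pvVid a == k) =
      PySem.List.insertBy pvLtF x (acc.filter (fun a => pvVid a == k)) := by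
  induction acc with
  | nil => simp [insertBy_nil, List.filter, hx]
  | cons y ys ih =>
    rcases List.pairwise_cons.mp h with ⟨hy, hys⟩
    rw [insertBy_cons]
    by_cases hlt : pvLt x y = true
    · simp only [hlt, if_true]
      by_cases hky : pvVid y = k
      · have hxy : pvFid x < pvFid y := by
          rcases (pvLt_iff x y).mp hlt with h' | ⟨_, h'⟩
          · exact absurd (hx ▸ hky ▸ h') (lt_irrefl _)
          · exact h'
        rw [List.filter_cons_of_pos (by simp [hx]), List.filter_cons_of_pos (by simp [hky]),
          insertBy_cons, if_pos (by simp [pvLtF, hxy])]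
      · -- y has another validator and x < y, so no later element of ys has validator k
        have hvxy : pvVid x < pvVid y := by
          rcases (pvLt_iff x y).mp hlt with h' | ⟨h', _⟩
          · exact h'
          · exact absurd (hx ▸ h') (fun e => hky e.symm)
        have hnil : ys.filter (fun a => pvVid a == k) = [] := by
          rw [List.filter_eq_nil_iff]
          intro z hz hzk
          have hzy : pvLt z y = false := hy z hz
          rw [pvLt_false_iff] at hzy
          exact hzy (Or.inl (by
            have : pvVid z = k := by simpa using hzk
            calc pvVid z = pvVid x := by rw [this, hx]
              _ < pvVid y := hvxy))
        rw [List.filter_cons_of_pos (by simp [hx]), List.filter_cons_of_neg (by simp [hky]), hnil,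
          insertBy_nil]
    · have hlt' : pvLt x y = false := Bool.eq_false_iff.mpr hlt
      simp only [hlt', Bool.false_eq_true, if_false]
      by_cases hky : pvVid y = k
      · have hxy : ¬ pvFid x < pvFid y := by
          rw [pvLt_false_iff] at hlt'
          intro hf
          exact hlt' (Or.inr ⟨hx ▸ hky ▸ rfl, hf⟩)
        rw [List.filter_cons_of_pos (by simp [hky]), List.filter_cons_of_pos (by simp [hky]),
          insertBy_cons, if_neg (by simp [pvLtF, hxy]), ih hys]
      · rw [List.filter_cons_of_neg (by simp [hky]), List.filter_cons_of_neg (by simp [hky]),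
          ih hys]

lemma filter_foldl_insertBy (k : String) (xs : List (List (String × String))) :
    ∀ acc, acc.Pairwise (fun a b => pvLt b a = false) →
      (xs.foldl (fun a x => PySem.List.insertBy pvLt x a) acc).filter (fun a => pvVid a == k) =
        (xs.filter (fun a => pvVid a == k)).foldl (fun a x => PySem.List.insertBy pvLtF x a)
          (acc.filter (fun a => pvVid a == k)) := by
  induction xs with
  | nil => intro acc _; rfl
  | cons x xs ih =>
    intro acc h
    simp only [List.foldl_cons]
    rw [ih _ (pairwise_insertBy x acc h)]
    by_cases hx : pvVid x = k
    · rw [List.filter_cons_of_pos (by simp [hx]), List.foldl_cons,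
        filter_insertBy_pos k x acc hx h]
    · rw [List.filter_cons_of_neg (by simp [hx]),
        filter_insertBy_neg _ _ _ _ (by simp [hx])]

-- sorted2 then filter one validator = filter then sorted by finding_id (stability made explicit)
lemma filter_sorted2 (k : String) (findings : List (List (String × String))) :
    (PySem.List.sorted2 findings pvVid pvFid).filter (fun a => pvVid a == k) =
      PySem.List.sorted (findings.filter (fun a => pvVid a == k)) pvFid := by
  have h1 : PySem.List.sorted2 findings pvVid pvFid =
      findings.foldl (fun a x => PySem.List.insertBy pvLt x a) [] := rfl
  have h2 : PySem.List.sorted (findings.filter (fun a => pvVid a == k)) pvFid =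
      (findings.filter (fun a => pvVid a == k)).foldl
        (fun a x => PySem.List.insertBy pvLtF x a) [] := rfl
  rw [h1, h2, filter_foldl_insertBy k findings [] List.Pairwise.nil]
  rfl

lemma sorted2_pairwise_le (findings : List (List (String × String))) :
    ((PySem.List.sorted2 findings pvVid pvFid).map pvVid).Pairwise (· ≤ ·) := by
  have h : (PySem.List.sorted2 findings pvVid pvFid).Pairwise (fun a b => pvLt b a = false) :=
    pairwise_foldl_insertBy findings [] List.Pairwise.nil
  rw [List.pairwise_map]
  refine h.imp ?_
  intro a b hab
  rw [pvLt_false_iff] at hab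
  rw [not_or] at hab
  exact le_of_not_gt hab.1

-- Set.ofList is a subsequence of its argument
lemma setOfList_sublist_aux (xs : List String) :
    ∀ s : PySem.Set String, ∃ t, xs.foldl PySem.Set.add s = s ++ t ∧ t.Sublist xs := by
  induction xs with
  | nil => intro s; exact ⟨[], by simp, List.Sublist.refl []⟩
  | cons x xs ih =>
    intro s
    simp only [List.foldl_cons]
    by_cases hc : PySem.Set.contains s x = true
    · have hadd : PySem.Set.add s x = s := by simp only [PySem.Set.add, hc, if_true]
      rw [hadd]
      obtain ⟨t, ht, hs⟩ := ih s
      exact ⟨t, ht, hs.cons x⟩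
    · have hadd : PySem.Set.add s x = s ++ [x] := by
        simp only [PySem.Set.add, hc, Bool.false_eq_true, if_false]
      rw [hadd]
      obtain ⟨t, ht, hs⟩ := ih (s ++ [x])
      exact ⟨x :: t, by rw [ht]; simp, hs.cons₂ x⟩

lemma setOfList_sublist (xs : List String) : (PySem.Set.ofList xs).Sublist xs := by
  obtain ⟨t, ht, hs⟩ := setOfList_sublist_aux xs []
  rw [PySem.Set.ofList_eq_foldl, ht]
  simpa using hs

-- items of the grouping dict, for any input list
lemma pvGroup_items (l : List (List (String × String))) :
    (pvGroup l).items =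
      (PySem.Set.ofList (l.map pvVid)).map
        (fun k => (k, l.filter (fun x => pvVid x == k))) := by
  have hkeys : (pvGroup l).keys = PySem.Set.ofList (l.map pvVid) := by
    have := PySem.Dict.keys_foldl_modify_key l pvVid
      (d0 := ([] : List (List (String × String))))
      (f := fun (_ : PySem.Dict String (List (List (String × String)))) (item : List (String × String)) => (fun g => g ++ [item]))
      (d := PySem.Dict.empty)
    simpa [pvGroup, PySem.Set.ofList_eq_foldl, PySem.Set.update, PySem.Dict.keys_empty] using this
  have hnodup : (pvGroup l).keys.Nodup := by
    apply PySem.Dict.nodup_keys_foldl_modify_key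
    simp
  have hgetD : ∀ k, (pvGroup l).getD k [] = l.filter (fun x => pvVid x == k) := by
    intro k
    have hfold : pvGroup l =
        (l.map (fun x => (pvVid x, x))).foldl
          (fun d p => d.modify p.1 [] (fun g => g ++ [p.2])) PySem.Dict.empty := by
      rw [List.foldl_map]
      rfl
    rw [hfold, PySem.Dict.getD_foldl_modify_append]
    simp [List.filter_map, Function.comp_def]
  rw [PySem.Dict.items_eq_map_keys (pvGroup l) hnodup [], hkeys]
  exact List.map_congr_left (fun k _ => by rw [hgetD k])

-- ---- run-splitting lemmas for port B ----

-- the head of a dropWhile residue fails the predicate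
lemma dropWhile_head_false {α : Type} (p : α → Bool) :
    ∀ (l : List α) (y : α) (ys : List α), l.dropWhile p = y :: ys → p y = false := by
  intro l
  induction l with
  | nil => intro y ys h; simp [List.dropWhile] at h
  | cons a l ih =>
    intro y ys h
    by_cases ha : p a = true
    · rw [List.dropWhile_cons, if_pos ha] at h
      exact ih y ys h
    · rw [List.dropWhile_cons, if_neg ha] at h
      cases h
      exact Bool.eq_false_iff.mpr ha

-- a block of equal keys collapses in the Set fold
lemma foldl_add_block (key : String) :
    ∀ ks : List String, (∀ a ∈ ks, a = key) → ks.foldl PySem.Set.add [key] = [key] := by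
  intro ks
  induction ks with
  | nil => intro _; rfl
  | cons a ks ih =>
    intro h
    have ha : a = key := h a (List.mem_cons_self)
    have : PySem.Set.add [key] a = [key] := by
      subst ha
      exact PySem.Set.add_of_mem (List.mem_singleton.mpr rfl)
    rw [List.foldl_cons, this]
    exact ih (fun b hb => h b (List.mem_cons_of_mem a hb))

-- a key absent from the rest of the fold input stays at the front
lemma foldl_add_shift (key : String) :
    ∀ (xs : List String) (s : List String), key ∉ xs →
      xs.foldl PySem.Set.add (key :: s) = key :: xs.foldl PySem.Set.add s := by
  intro xs
  induction xs with
  | nil => intro s _; rfl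
  | cons a xs ih =>
    intro s hk
    have hak : a ≠ key := fun e => hk (e ▸ List.mem_cons_self)
    have hk' : key ∉ xs := fun h => hk (List.mem_cons_of_mem a h)
    by_cases hmem : a ∈ s
    · rw [List.foldl_cons, List.foldl_cons,
        PySem.Set.add_of_mem (List.mem_cons_of_mem key hmem), PySem.Set.add_of_mem hmem]
      exact ih s hk'
    · have hmem' : a ∉ (key :: s) := by
        intro h
        rcases List.mem_cons.mp h with h | h
        · exact hak h
        · exact hmem h
      rw [List.foldl_cons, List.foldl_cons, PySem.Set.add_of_not_mem hmem',
        PySem.Set.add_of_not_mem hmem]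
      exact ih (s ++ [a]) hk'

-- pvRuns of a validator-sorted list is exactly the per-key grouping of that list
lemma pvRuns_sorted :
    ∀ (l : List (List (String × String))), ((l.map pvVid).Pairwise (· ≤ ·)) →
      pvRuns l = (PySem.Set.ofList (l.map pvVid)).map
        (fun k => (k, l.filter (fun x => pvVid x == k))) := by
  intro l
  induction l using pvRuns.induct with
  | case1 => intro _; simp [pvRuns]
  | case2 x xs ih =>
    intro hsorted
    set key := pvVid x with hkeydef
    set grp := (x :: xs).takeWhile (fun y => pvKeyB y == pvKeyB x) with hgrp
    set rest := (x :: xs).dropWhile (fun y => pvKeyB y == pvKeyB x) with hrest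
    have hsplit : grp ++ rest = x :: xs := List.takeWhile_append_dropWhile
    have hgrpkey : ∀ y ∈ grp, pvVid y = key := by
      intro y hy
      have := List.mem_takeWhile_imp hy
      simpa [pvKeyB_eq, hkeydef] using this
    have hle : ∀ y ∈ x :: xs, key ≤ pvVid y := by
      intro y hy
      rcases List.mem_cons.mp hy with rfl | hy
      · exact le_refl _
      · have := List.pairwise_cons.mp hsorted
        exact this.1 (pvVid y) (List.mem_map_of_mem hy)
    have hrestsorted : (rest.map pvVid).Pairwise (· ≤ ·) := by
      have hs : rest.Sublist (x :: xs) := by rw [hrest]; exact List.dropWhile_sublist _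
      exact List.pairwise_map.mpr ((List.pairwise_map.mp hsorted).sublist hs)
    have hrestne : ∀ y ∈ rest, pvVid y ≠ key := by
      rcases hre : rest with _ | ⟨r, rs⟩
      · intro y hy; exact absurd hy List.not_mem_nil
      · have hdw : List.dropWhile (fun y => pvKeyB y == pvKeyB x) (x :: xs) = r :: rs := by
          rw [← hrest, hre]
        have hrf : pvVid r ≠ key := by
          have := dropWhile_head_false (fun y => pvKeyB y == pvKeyB x) (x :: xs) r rs hdw
          simpa [pvKeyB_eq, hkeydef] using this
        have hrmem : r ∈ x :: xs :=
          (List.dropWhile_sublist _).subset (by rw [hdw]; exact List.mem_cons_self)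
        have hrl : key < pvVid r := lt_of_le_of_ne (hle r hrmem) (Ne.symm hrf)
        have hrs : ((r :: rs).map pvVid).Pairwise (· ≤ ·) := by rw [← hre]; exact hrestsorted
        intro y hy
        rcases List.mem_cons.mp hy with rfl | hy'
        · exact hrf
        · have h2 := List.pairwise_cons.mp (List.pairwise_map.mp hrs)
          exact ne_of_gt (lt_of_lt_of_le hrl (h2.1 y hy'))
    have hkeys : PySem.Set.ofList ((x :: xs).map pvVid) = key :: PySem.Set.ofList (rest.map pvVid) := by
      have hmapsplit : (x :: xs).map pvVid = grp.map pvVid ++ rest.map pvVid := by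
        rw [← hsplit, List.map_append]
      have hgrphead : ∃ t, grp.map pvVid = key :: t ∧ ∀ a ∈ t, a = key := by
        have hgx : grp = x :: xs.takeWhile (fun y => pvKeyB y == pvKeyB x) := by
          rw [hgrp, List.takeWhile_cons, if_pos (by simp)]
        refine ⟨(xs.takeWhile (fun y => pvKeyB y == pvKeyB x)).map pvVid, by rw [hgx]; rfl, ?_⟩
        intro a ha
        rcases List.mem_map.mp ha with ⟨y, hy, rfl⟩
        exact hgrpkey y (by rw [hgx]; exact List.mem_cons_of_mem x hy)
      obtain ⟨t, ht, htall⟩ := hgrphead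
      have hknot : key ∉ rest.map pvVid := by
        intro h
        rcases List.mem_map.mp h with ⟨y, hy, he⟩
        exact hrestne y hy he
      rw [PySem.Set.ofList_eq_foldl, hmapsplit, List.foldl_append, ht, List.foldl_cons]
      have h0 : PySem.Set.add ([] : List String) key = [key] := by
        simp [PySem.Set.add]
      rw [h0, foldl_add_block key t htall, foldl_add_shift key _ [] hknot,
        PySem.Set.ofList_eq_foldl]
    have hgrpfilter : (x :: xs).filter (fun y => pvVid y == key) = grp := by
      rw [← hsplit, List.filter_append]
      have h1 : grp.filter (fun y => pvVid y == key) = grp :=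
        List.filter_eq_self.mpr (fun y hy => by simp [hgrpkey y hy])
      have h2 : rest.filter (fun y => pvVid y == key) = [] :=
        List.filter_eq_nil_iff.mpr (fun y hy => by simp [hrestne y hy])
      rw [h1, h2, List.append_nil]
    have hother : ∀ k, k ∈ PySem.Set.ofList (rest.map pvVid) →
        (x :: xs).filter (fun y => pvVid y == k) = rest.filter (fun y => pvVid y == k) := by
      intro k hk
      have hkne : k ≠ key := by
        rcases List.mem_map.mp ((PySem.Set.mem_ofList _ _).mp hk) with ⟨y, hy, rfl⟩
        exact hrestne y hy
      rw [← hsplit, List.filter_append]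
      have h1 : grp.filter (fun y => pvVid y == k) = [] :=
        List.filter_eq_nil_iff.mpr (fun y hy => by simp [hgrpkey y hy, Ne.symm hkne])
      rw [h1, List.nil_append]
    rw [pvRuns, ← hgrp, ← hrest, ih hrestsorted, hkeys, List.map_cons]
    congr 1
    · rw [show pvKeyB x = key from rfl, hgrpfilter]
    · exact List.map_congr_left (fun k hk => by rw [hother k hk])

-- ===== VERDICT (by name: the statement is the Claim_ definition above) =====
theorem group_findings_by_validator_py_spec : Claim_equal_group_findings_by_validator_py := by
  intro findings _ _
  unfold Spec_group_findings_by_validator_py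
  unfold group_findings_by_validator_py group_findings_by_validator_py_alt
  rw [pvKeyB_eq, pvFidB_eq, pvRuns_sorted _ (sorted2_pairwise_le findings)]
  simp only [pvGroup_items]
  have hK : PySem.List.sorted
      ((PySem.Set.ofList (findings.map pvVid)).map
        (fun k => (k, findings.filter (fun x => pvVid x == k)))) (fun p => p.1) =
      (PySem.List.sorted (PySem.Set.ofList (findings.map pvVid)) (fun x => x)).map
        (fun k => (k, findings.filter (fun x => pvVid x == k))) := by
    apply PySem.List.sorted_eq_of_perm_of_pairwise_lt
    · exact (PySem.List.sorted_perm _ _ _).map _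
    · rw [List.pairwise_map]
      simpa using PySem.List.sorted_ofList_pairwise_lt (findings.map pvVid)
  have hKeys : PySem.Set.ofList ((PySem.List.sorted2 findings pvVid pvFid).map pvVid) =
      PySem.List.sorted (PySem.Set.ofList (findings.map pvVid)) (fun x => x) := by
    symm
    apply PySem.List.sorted_eq_of_perm_of_pairwise_lt
    · apply (List.perm_ext_iff_of_nodup (PySem.Set.nodup_ofList _) (PySem.Set.nodup_ofList _)).mpr
      intro a
      rw [PySem.Set.mem_ofList, PySem.Set.mem_ofList]
      constructor
      · intro ha
        rcases List.mem_map.mp ha with ⟨x, hx, rfl⟩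
        exact List.mem_map_of_mem ((PySem.List.sorted2_perm findings pvVid pvFid false).mem_iff.mp hx)
      · intro ha
        rcases List.mem_map.mp ha with ⟨x, hx, rfl⟩
        exact List.mem_map_of_mem ((PySem.List.sorted2_perm findings pvVid pvFid false).mem_iff.mpr hx)
    · have hle : (PySem.Set.ofList ((PySem.List.sorted2 findings pvVid pvFid).map pvVid)).Pairwise (· ≤ ·) :=
        (sorted2_pairwise_le findings).sublist (setOfList_sublist _)
      exact ((hle.and (PySem.Set.nodup_ofList _)).imp (fun h => lt_of_le_of_ne h.1 h.2))
  rw [hK, hKeys, List.map_map]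
  apply List.map_congr_left
  intro k _
  simp only [Function.comp_apply]
  rw [filter_sorted2 k findings]
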